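-- pv_equiv track=rewrite | github.com/bhamsu/Bajaj-AI-Assistant-Unmasking-Deceptive-Designs | optimization.py | is_valid_gst
-- ===== SOURCE A (Python) =====
-- def is_valid_gst(gsts):
--     temp = gsts[0]
--     for gst in gsts:
--         if len(gst) == 15:
--             return gst
--         elif 15 <= len(gst) >= 16:
--             temp = gst
--     return temp
-- ===== SOURCE B (Python) =====
-- def is_valid_gst(gsts):
--     # Pass 1: first GST of length exactly 15 wins.
--     for g in gsts:
--         if len(g) == 15:
--             return g
--     # Pass 2: fallback is the last element of length >= 16, else the first element.
--     return next((g for g in reversed(gsts) if len(g) >= 16), gsts[0])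
-- ===== Notes on version B (the rewrite author's own statement) =====
-- stated objective: simpler
-- what changed: Replaces A's single fused pass (early return plus inline temp tracking with the confusing chained comparison '15 <= len(gst) >= 16') with two plainly shaped passes: find the first length-15 element, else the last length>=16 element via reversed(), else gsts[0].
-- outside the precondition, e.g. on is_valid_gst([]): A raises IndexError, B raises IndexError
import Mathlib
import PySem

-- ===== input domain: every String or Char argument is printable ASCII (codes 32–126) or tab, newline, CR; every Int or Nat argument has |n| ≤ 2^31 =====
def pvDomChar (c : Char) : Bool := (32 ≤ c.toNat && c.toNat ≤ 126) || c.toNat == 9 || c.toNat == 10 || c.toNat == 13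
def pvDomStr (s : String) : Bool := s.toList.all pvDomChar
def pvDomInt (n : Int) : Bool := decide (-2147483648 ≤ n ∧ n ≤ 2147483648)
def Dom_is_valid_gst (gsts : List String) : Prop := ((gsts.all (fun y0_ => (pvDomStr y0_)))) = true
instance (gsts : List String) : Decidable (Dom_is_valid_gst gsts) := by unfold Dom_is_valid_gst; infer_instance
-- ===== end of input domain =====

-- B replaces A's fused early-return/temp-tracking loop with two plain passes (first len==15, else last len>=16, else gsts[0]); objective: simpler.

-- ===== PORT A =====
-- the for-loop of A: early return on len == 15, update temp on the chained comparison 15 <= len >= 16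
def isValidGstLoopA : List String → String → String
  | [], temp => temp
  | g :: rest, temp =>
      if PySem.Str.len g = 15 then g
      else if 15 ≤ PySem.Str.len g ∧ PySem.Str.len g ≥ 16 then isValidGstLoopA rest g
      else isValidGstLoopA rest temp

def is_valid_gst (gsts : List String) : String :=
  match PySem.List.pyGet? gsts 0 with
  | none => ""       -- gsts[0] raises IndexError; excluded by Pre_
  | some t0 => isValidGstLoopA gsts t0

-- ===== PORT B =====
-- pass 1 of B: first element of length exactly 15
def findLen15 : List String → Option String
  | [] => none
  | g :: rest => if PySem.Str.len g = 15 then some g else findLen15 rest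

-- pass 2 of B: next(...) over a list = first element of length >= 16
def findGe16 : List String → Option String
  | [] => none
  | g :: rest => if PySem.Str.len g ≥ 16 then some g else findGe16 rest

def is_valid_gst_alt (gsts : List String) : String :=
  match findLen15 gsts with
  | some g => g
  | none =>
      match PySem.List.pyGet? gsts 0 with
      | none => ""   -- gsts[0] raises IndexError; excluded by Pre_
      | some g0 => (findGe16 gsts.reverse).getD g0

-- ===== PRECONDITION & SPEC =====
-- both programs raise IndexError on the empty list (gsts[0])
def Pre_is_valid_gst (gsts : List String) : Prop := gsts ≠ []
instance (gsts : List String) : Decidable (Pre_is_valid_gst gsts) := by unfold Pre_is_valid_gst; infer_instance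
def pvWitness_is_valid_gst : List String := ["123456789012345"]

def Spec_is_valid_gst (gsts : List String) (out : String) : Prop := out = is_valid_gst_alt gsts
instance (gsts : List String) (out : String) : Decidable (Spec_is_valid_gst gsts out) := by unfold Spec_is_valid_gst; infer_instance

-- ===== CLAIM (what is proved, stated in full; the proofs are below) =====
def Claim_equal_is_valid_gst : Prop := ∀ (gsts : List String), Dom_is_valid_gst gsts → Pre_is_valid_gst gsts → Spec_is_valid_gst gsts (is_valid_gst gsts)

-- ===== LEMMAS AND PROOFS =====

-- unfold the cons cases with the conditions normalised to Nat comparisons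
theorem loopA_cons (g : String) (rest : List String) (temp : String) :
    isValidGstLoopA (g :: rest) temp =
      (if g.toList.length = 15 then g
       else if 16 ≤ g.toList.length then isValidGstLoopA rest g
       else isValidGstLoopA rest temp) := by
  simp only [isValidGstLoopA, PySem.Str.len_eq, ge_iff_le]
  split_ifs <;> first | rfl | omega

theorem findLen15_cons (g : String) (rest : List String) :
    findLen15 (g :: rest) = (if g.toList.length = 15 then some g else findLen15 rest) := by
  simp only [findLen15, PySem.Str.len_eq]
  split_ifs <;> first | rfl | omega

theorem findGe16_cons (g : String) (rest : List String) :
    findGe16 (g :: rest) = (if 16 ≤ g.toList.length then some g else findGe16 rest) := by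
  simp only [findGe16, PySem.Str.len_eq, ge_iff_le]
  split_ifs <;> first | rfl | omega

theorem findGe16_append_single (xs : List String) (g : String) :
    findGe16 (xs ++ [g]) = ((findGe16 xs).or (if 16 ≤ g.toList.length then some g else none)) := by
  induction xs with
  | nil => simp [findGe16, findGe16_cons]
  | cons x xs ih =>
      rw [List.cons_append, findGe16_cons, findGe16_cons, ih]
      split_ifs <;> simp

-- A's loop equals B's two-pass decomposition, for any current temp
theorem loopA_eq (l : List String) : ∀ temp : String,
    isValidGstLoopA l temp =
      (match findLen15 l with
       | some g => g
       | none => (findGe16 l.reverse).getD temp) := by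
  induction l with
  | nil => intro temp; simp [isValidGstLoopA, findLen15, findGe16]
  | cons g rest ih =>
      intro temp
      rw [loopA_cons, findLen15_cons, List.reverse_cons, findGe16_append_single]
      by_cases h15 : g.toList.length = 15
      · simp [h15]
      · by_cases h16 : 16 ≤ g.toList.length
        · rw [if_neg h15, if_pos h16, if_neg h15, if_pos h16, ih g]
          cases findLen15 rest <;> cases findGe16 rest.reverse <;> simp
        · rw [if_neg h15, if_neg h16, if_neg h15, if_neg h16, ih temp]
          cases findLen15 rest <;> cases findGe16 rest.reverse <;> simp

-- ===== VERDICT (by name: the statement is the Claim_ definition above) =====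
theorem is_valid_gst_spec : Claim_equal_is_valid_gst := by
  intro gsts _ hpre
  unfold Spec_is_valid_gst is_valid_gst is_valid_gst_alt
  cases gsts with
  | nil => exact absurd rfl hpre
  | cons g0 rest =>
      have hget : PySem.List.pyGet? (g0 :: rest) 0 = some g0 := by
        simp [PySem.List.pyGet?, PySem.List.pyIdx?]
      simp only [hget, loopA_eq]
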